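-- pv_equiv track=rewrite | github.com/kirillbobk/Retransmission-2 | Untitled-8.py | con_str
-- ===== SOURCE A (Python) =====
-- def con_str(arg_str_list):
--     if not arg_str_list:
--         return ""
--     else:
--         first_str = arg_str_list[0]
--         rest_of_str = arg_str_list[1:]
--         concatenated_str = first_str + " " + con_str(rest_of_str)
--         return concatenated_str
-- ===== SOURCE B (Python) =====
-- def con_str(arg_str_list):
--     result = ""
--     for s in arg_str_list:
--         result += s + " "
--     return result
-- ===== Notes on version B (the rewrite author's own statement) =====
-- stated objective: faster
-- what changed: Replaced the head/tail recursion (which re-slices the list and rebuilds the string back-to-front via nested concatenations) with a single iterative loop accumulating the result front-to-back.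
import Mathlib
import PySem

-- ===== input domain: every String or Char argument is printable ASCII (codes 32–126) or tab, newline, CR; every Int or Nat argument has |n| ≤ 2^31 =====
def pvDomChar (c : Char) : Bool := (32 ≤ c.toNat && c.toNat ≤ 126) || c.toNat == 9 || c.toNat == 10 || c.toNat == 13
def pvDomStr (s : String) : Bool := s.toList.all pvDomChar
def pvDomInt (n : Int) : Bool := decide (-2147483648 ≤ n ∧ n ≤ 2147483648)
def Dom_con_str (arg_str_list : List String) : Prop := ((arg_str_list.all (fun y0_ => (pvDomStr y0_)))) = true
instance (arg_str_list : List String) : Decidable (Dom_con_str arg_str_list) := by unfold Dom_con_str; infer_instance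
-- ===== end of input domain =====

-- B replaces A's head/tail recursion with an iterative front-to-back accumulator loop (objective: simpler).


-- ===== PORT A =====
-- literal port of A: empty check, take head, slice the rest, recurse and concatenate
def con_str (arg_str_list : List String) : String :=
  match arg_str_list with
  | [] => ""
  | first_str :: rest_of_str =>
      first_str ++ " " ++ con_str rest_of_str

-- ===== PORT B =====
-- literal port of B: iterative accumulation, result += s + " " for each s
def con_str_alt (arg_str_list : List String) : String :=
  arg_str_list.foldl (fun result s => result ++ s ++ " ") ""

-- ===== PRECONDITION & SPEC =====
def Spec_con_str (arg_str_list : List String) (out : String) : Prop := out = con_str_alt arg_str_list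
instance (arg_str_list : List String) (out : String) : Decidable (Spec_con_str arg_str_list out) := by unfold Spec_con_str; infer_instance

-- ===== CLAIM (what is proved, stated in full; the proofs are below) =====
def Claim_equal_con_str : Prop := ∀ (arg_str_list : List String), Dom_con_str arg_str_list → Spec_con_str arg_str_list (con_str arg_str_list)

-- ===== LEMMAS AND PROOFS =====
theorem con_str_foldl (l : List String) (acc : String) :
    l.foldl (fun result s => result ++ s ++ " ") acc = acc ++ con_str l := by
  induction l generalizing acc with
  | nil => simp [con_str]
  | cons h t ih =>
      simp only [List.foldl_cons, con_str, ih]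
      simp [String.append_assoc]

-- ===== VERDICT (by name: the statement is the Claim_ definition above) =====
theorem con_str_spec : Claim_equal_con_str := by
  intro l _
  show con_str l = con_str_alt l
  simp [con_str_alt, con_str_foldl]
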